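-- pv_equiv track=rewrite | github.com/vailinhhon957/aiops-rca | pipeline/rca_data_pipeline/scripts/13_run_batch_dataset.py | supported_rows
-- ===== SOURCE A (Python) =====
-- SUPPORTED_FAULT_TYPES = {
--     "none",
--     "pod-kill",
--     "replica-drop",
--     "cpu-stress",
--     "memory-stress",
--     "latency-injection",
--     "timeout",
--     "http-500",
-- }
--
-- def supported_rows(rows: list[dict[str, str]]) -> tuple[list[dict[str, str]], list[dict[str, str]]]:
--     supported = []
--     unsupported = []
--     for row in rows:
--         fault_type = (row.get("fault_type") or "none").strip().lower()
--         if fault_type in SUPPORTED_FAULT_TYPES: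
--             supported.append(row)
--         else:
--             unsupported.append(row)
--     return supported, unsupported
-- ===== SOURCE B (Python) =====
-- SUPPORTED_FAULT_TYPES = {
--     "none",
--     "pod-kill",
--     "replica-drop",
--     "cpu-stress",
--     "memory-stress",
--     "latency-injection",
--     "timeout",
--     "http-500",
-- }
--
-- def supported_rows(rows):
--     # Recursive decomposition: classify the head, recurse on the tail,
--     # and prepend the head to the matching result list.
--     if not rows:
--         return [], []
--     head = rows[0]
--     sup, unsup = supported_rows(rows[1:])
--     fault_type = (head.get("fault_type") or "none").strip().lower()
--     if fault_type in SUPPORTED_FAULT_TYPES: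
--         return [head] + sup, unsup
--     return sup, [head] + unsup
-- ===== Notes on version B (the rewrite author's own statement) =====
-- stated objective: alternative
-- what changed: Replaced A's single forward accumulator loop (appending each row to one of two growing lists) with a structural recursion that classifies the head row and prepends it to the result of recursing on the tail.
import Mathlib
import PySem

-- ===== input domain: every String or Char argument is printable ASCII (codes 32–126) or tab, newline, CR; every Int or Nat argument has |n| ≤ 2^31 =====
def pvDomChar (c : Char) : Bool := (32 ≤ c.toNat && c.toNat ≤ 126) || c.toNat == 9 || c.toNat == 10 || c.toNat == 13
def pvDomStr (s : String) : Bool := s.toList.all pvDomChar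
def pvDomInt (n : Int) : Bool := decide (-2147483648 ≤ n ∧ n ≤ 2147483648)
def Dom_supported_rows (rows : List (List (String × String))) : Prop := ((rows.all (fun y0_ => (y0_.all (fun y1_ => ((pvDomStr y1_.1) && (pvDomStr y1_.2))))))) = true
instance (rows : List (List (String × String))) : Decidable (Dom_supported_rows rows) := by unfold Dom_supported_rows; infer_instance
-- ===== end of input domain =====

-- B replaces A's single forward accumulator loop with a head/tail structural recursion that prepends each row (alternative decomposition; same O(n) classification cost).

-- shared module context: the constant set and the normalization (row.get("fault_type") or "none").strip().lower()
def pvSupportedFaultTypes : PySem.Set String :=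
  PySem.Set.ofList ["none", "pod-kill", "replica-drop", "cpu-stress", "memory-stress",
    "latency-injection", "timeout", "http-500"]

def pvNorm (row : List (String × String)) : String :=
  PySem.Str.lower (PySem.Str.strip
    (match (PySem.Dict.mk row).get? "fault_type" with
     | some s => if s = "" then "none" else s   -- 'or "none"': empty string is falsy
     | none => "none"))

-- ===== PORT A =====
def supported_rows (rows : List (List (String × String))) : (List (List (String × String))) × (List (List (String × String))) :=
  let r := rows.foldl (fun acc row =>
    if PySem.Set.contains pvSupportedFaultTypes (pvNorm row) then
      (acc.1 ++ [row], acc.2)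
    else
      (acc.1, acc.2 ++ [row])) ([], [])
  (r.1, r.2)

-- ===== PORT B =====
def supported_rows_alt : List (List (String × String)) → (List (List (String × String))) × (List (List (String × String)))
  | [] => ([], [])
  | head :: rest =>
    match supported_rows_alt rest with
    | (sup, unsup) =>
      if PySem.Set.contains pvSupportedFaultTypes (pvNorm head) then
        (head :: sup, unsup)
      else
        (sup, head :: unsup)

-- ===== PRECONDITION & SPEC =====
def Spec_supported_rows (rows : List (List (String × String))) (out : (List (List (String × String))) × (List (List (String × String)))) : Prop := out = supported_rows_alt rows
instance (rows : List (List (String × String))) (out : (List (List (String × String))) × (List (List (String × String)))) : Decidable (Spec_supported_rows rows out) := by unfold Spec_supported_rows; infer_instance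

-- ===== CLAIM =====
def Claim_equal_supported_rows : Prop := ∀ (rows : List (List (String × String))), Dom_supported_rows rows → Spec_supported_rows rows (supported_rows rows)

-- ===== LEMMAS AND PROOFS =====

-- A's left fold with general accumulator equals the accumulator appended with B's recursion componentwise.
theorem pv_foldl_eq_rec (rows : List (List (String × String)))
    (a b : List (List (String × String))) :
    rows.foldl (fun acc row =>
        if PySem.Set.contains pvSupportedFaultTypes (pvNorm row) then (acc.1 ++ [row], acc.2)
        else (acc.1, acc.2 ++ [row])) (a, b)
      = (a ++ (supported_rows_alt rows).1, b ++ (supported_rows_alt rows).2) := by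
  induction rows generalizing a b with
  | nil => simp [supported_rows_alt]
  | cons r rs ih =>
    by_cases h : PySem.Set.contains pvSupportedFaultTypes (pvNorm r) = true <;>
      simp only [List.foldl_cons, supported_rows_alt, h, if_true, if_false, ih,
        Bool.false_eq_true, ite_false, ite_true] <;>
      simp [List.append_assoc]

-- ===== VERDICT =====
theorem supported_rows_spec : Claim_equal_supported_rows := by
  intro rows _
  show supported_rows rows = supported_rows_alt rows
  unfold supported_rows
  rw [pv_foldl_eq_rec]
  simp
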